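-- pv_equiv track=rewrite | github.com/Ellllll/Whoiswho | mind/hgt/scripts/visualize_networkx_author_paper.py | build_global_paper_to_authors
-- ===== SOURCE A (Python) =====
-- from collections import Counter, defaultdict
--
-- def build_global_paper_to_authors(author_data):
--     paper_to_authors = defaultdict(set)
--     paper_to_roles = defaultdict(list)
--     for author_id, info in author_data.items():
--         for pid in info.get("normal_data", []):
--             paper_to_authors[pid].add(author_id)
--             paper_to_roles[pid].append((author_id, "normal"))
--         for pid in info.get("outliers", []):
--             paper_to_authors[pid].add(author_id)
--             paper_to_roles[pid].append((author_id, "outlier"))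
--     return paper_to_authors, paper_to_roles
-- ===== SOURCE B (Python) =====
-- from collections import defaultdict
--
-- def build_global_paper_to_authors(author_data):
--     # Flatten the nested input into one ordered event stream, then group by paper id.
--     events = []
--     for author_id, info in author_data.items():
--         for pid in info.get("normal_data", []):
--             events.append((pid, author_id, "normal"))
--         for pid in info.get("outliers", []):
--             events.append((pid, author_id, "outlier"))
--     order = list(dict.fromkeys(pid for pid, _, _ in events))
--     paper_to_roles = defaultdict(list)
--     paper_to_authors = defaultdict(set)
--     for pid in order:
--         roles = [(aid, role) for p, aid, role in events if p == pid]
--         paper_to_roles[pid] = roles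
--         paper_to_authors[pid] = {aid for aid, _ in roles}
--     return paper_to_authors, paper_to_roles
-- ===== Notes on version B (the rewrite author's own statement) =====
-- stated objective: alternative
-- what changed: B flattens the nested input into one ordered (pid, author, role) event stream, then builds both dicts by grouping: key order from first-occurrence dedup of pids, each paper's role list by filtering the stream and its author set from that list, instead of A's incremental per-event updates of two defaultdicts.
import Mathlib
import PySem

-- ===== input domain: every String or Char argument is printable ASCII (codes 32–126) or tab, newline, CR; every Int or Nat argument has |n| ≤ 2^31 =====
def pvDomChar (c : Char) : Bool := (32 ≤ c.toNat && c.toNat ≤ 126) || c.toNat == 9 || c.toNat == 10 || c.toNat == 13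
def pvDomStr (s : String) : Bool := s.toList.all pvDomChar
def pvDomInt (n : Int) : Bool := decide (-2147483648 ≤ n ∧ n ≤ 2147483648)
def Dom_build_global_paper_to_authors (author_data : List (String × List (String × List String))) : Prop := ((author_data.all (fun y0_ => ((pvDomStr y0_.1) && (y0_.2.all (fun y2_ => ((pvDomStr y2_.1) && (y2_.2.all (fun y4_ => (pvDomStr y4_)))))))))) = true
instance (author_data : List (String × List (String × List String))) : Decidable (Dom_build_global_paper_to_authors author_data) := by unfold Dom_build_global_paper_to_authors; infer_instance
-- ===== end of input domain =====

-- B flattens the input into one ordered (pid, author, role) event stream and builds both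
-- dicts by group-by (first-occurrence key order, one filter scan per paper), instead of A's
-- incremental per-event updates of two defaultdicts (objective: alternative algorithm).

-- shared helper: info.get(k, []) — first match in the association list, default []
def pvGetList (info : List (String × List String)) (k : String) : List String :=
  match info.find? (fun p => p.1 = k) with
  | some p => p.2
  | none => []

-- ===== PORT A =====
-- d[k] = f(d.get(k, [])) on an insertion-ordered assoc list (defaultdict update: overwrite in
-- place, append a new key at the end) — exact for both defaultdict(list) and defaultdict(set)
def pvUpd {β : Type} (l : List (String × List β)) (k : String) (f : List β → List β) :
    List (String × List β) :=
  match l with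
  | [] => [(k, f [])]
  | p :: t => if p.1 = k then (p.1, f p.2) :: t else p :: pvUpd t k f

-- paper_to_authors[pid].add(author_id) (set add: PySem.Set.add)
def pvAddAuthor (pa : List (String × List String)) (pid aid : String) :
    List (String × List String) :=
  pvUpd pa pid (fun s => PySem.Set.add s aid)

-- paper_to_roles[pid].append((author_id, role))
def pvAppRole (pr : List (String × List (String × String))) (pid : String)
    (x : String × String) : List (String × List (String × String)) :=
  pvUpd pr pid (fun rs => rs ++ [x])

-- A updates both defaultdicts in the same loop over role events
def pvStepA (aid role : String)
    (st : (List (String × List String)) × (List (String × List (String × String))))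
    (pid : String) :
    (List (String × List String)) × (List (String × List (String × String))) :=
  (pvAddAuthor st.1 pid aid, pvAppRole st.2 pid (aid, role))

def build_global_paper_to_authors (author_data : List (String × List (String × List String))) : (List (String × List String)) × (List (String × List (String × String))) :=
  author_data.foldl
    (fun st a =>
      let st1 := (pvGetList a.2 "normal_data").foldl (pvStepA a.1 "normal") st
      (pvGetList a.2 "outliers").foldl (pvStepA a.1 "outlier") st1)
    ([], [])

-- ===== PORT B =====
-- pass 1: flatten into one ordered event stream (pid, (author_id, role))
def pvEvents (author_data : List (String × List (String × List String))) :
    List (String × (String × String)) :=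
  author_data.foldl
    (fun ev a =>
      let ev1 := (pvGetList a.2 "normal_data").foldl
        (fun ev pid => ev ++ [(pid, (a.1, "normal"))]) ev
      (pvGetList a.2 "outliers").foldl
        (fun ev pid => ev ++ [(pid, (a.1, "outlier"))]) ev1)
    []

-- pass 2: group by paper id — key order = first occurrence (dict.fromkeys = PySem.List.dedup),
-- role list = filter of the stream, author set = set of that list's author ids
def build_global_paper_to_authors_alt (author_data : List (String × List (String × List String))) : (List (String × List String)) × (List (String × List (String × String))) :=
  let events := pvEvents author_data
  let order := PySem.List.dedup (events.map (fun e => e.1))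
  (order.map (fun pid =>
      (pid, PySem.Set.ofList ((events.filter (fun e => e.1 = pid)).map (fun e => e.2.1)))),
   order.map (fun pid =>
      (pid, (events.filter (fun e => e.1 = pid)).map (fun e => e.2))))

-- ===== PRECONDITION & SPEC =====
def Spec_build_global_paper_to_authors (author_data : List (String × List (String × List String))) (out : (List (String × List String)) × (List (String × List (String × String)))) : Prop := out = build_global_paper_to_authors_alt author_data
instance (author_data : List (String × List (String × List String))) (out : (List (String × List String)) × (List (String × List (String × String)))) : Decidable (Spec_build_global_paper_to_authors author_data out) := by unfold Spec_build_global_paper_to_authors; infer_instance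

-- ===== CLAIM (what is proved, stated in full; the proofs are below) =====
def Claim_equal_build_global_paper_to_authors : Prop := ∀ (author_data : List (String × List (String × List String))), Dom_build_global_paper_to_authors author_data → Spec_build_global_paper_to_authors author_data (build_global_paper_to_authors author_data)

-- ===== LEMMAS AND PROOFS =====

-- ---------- generic pvUpd facts ----------

theorem keys_pvUpd {β : Type} (l : List (String × List β)) (k : String)
    (f : List β → List β) :
    (pvUpd l k f).map Prod.fst =
      if k ∈ l.map Prod.fst then l.map Prod.fst else l.map Prod.fst ++ [k] := by
  induction l with
  | nil => simp [pvUpd]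
  | cons p t ih =>
    by_cases h : p.1 = k
    · simp [pvUpd, h]
    · simp only [pvUpd, if_neg h, List.map_cons, List.mem_cons]
      rw [ih]
      by_cases hk : k ∈ t.map Prod.fst
      · simp [hk, Ne.symm h]
      · simp [hk, Ne.symm h]

theorem mem_keys_pvUpd {β : Type} (l : List (String × List β)) (k j : String)
    (f : List β → List β) (h : j ∈ l.map Prod.fst) :
    j ∈ (pvUpd l k f).map Prod.fst := by
  rw [keys_pvUpd]
  split_ifs with hk
  · exact h
  · exact List.mem_append_left _ h

theorem self_mem_keys_pvUpd {β : Type} (l : List (String × List β)) (k : String)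
    (f : List β → List β) : k ∈ (pvUpd l k f).map Prod.fst := by
  rw [keys_pvUpd]
  split_ifs with hk
  · exact hk
  · exact List.mem_append_right _ (List.mem_singleton_self k)

theorem pvUpd_not_mem {β : Type} (l : List (String × List β)) (k : String)
    (f : List β → List β) (h : k ∉ l.map Prod.fst) :
    pvUpd l k f = l ++ [(k, f [])] := by
  induction l with
  | nil => rfl
  | cons p t ih =>
    have h1 : ¬ p.1 = k := by intro hc; exact h (by simp [hc])
    have h2 : k ∉ t.map Prod.fst := fun hm => h (by simp [hm])
    simp [pvUpd, h1, ih h2]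

-- update inside a map over nodup keys, present key: pointwise update
theorem pvUpd_map {β : Type} (ks : List String) (g : String → List β) (k : String)
    (f : List β → List β) (hnd : ks.Nodup) (hk : k ∈ ks) :
    pvUpd (ks.map (fun j => (j, g j))) k f
      = ks.map (fun j => (j, if j = k then f (g j) else g j)) := by
  induction ks with
  | nil => simp at hk
  | cons a t ih =>
    obtain ⟨hjt, hndt⟩ := List.nodup_cons.mp hnd
    by_cases h : a = k
    · have hkt : k ∉ t := h ▸ hjt
      have hcong : ∀ x ∈ t, (fun y => (y, if y = k then f (g y) else g y)) x
          = (fun y => (y, g y)) x := by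
        intro x hx
        have hne : ¬ x = k := fun hc => hkt (hc ▸ hx)
        simp [hne]
      simp [pvUpd, h, List.map_congr_left hcong]
    · have hk' : k ∈ t := by
        rcases List.mem_cons.mp hk with hc | hc
        · exact absurd hc.symm h
        · exact hc
      simp [pvUpd, h, ih hndt hk']

-- ---------- dedup snoc ----------

theorem dedup_snoc (l : List String) (x : String) :
    PySem.List.dedup (l ++ [x])
      = if x ∈ l then PySem.List.dedup l else PySem.List.dedup l ++ [x] := by
  have h1 : PySem.List.dedup (l ++ [x]) = PySem.Set.add (PySem.List.dedup l) x := by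
    simp only [PySem.List.dedup_eq_ofList, PySem.Set.ofList_eq_foldl, List.foldl_append,
      List.foldl_cons, List.foldl_nil]
  rw [h1]
  by_cases hx : x ∈ l
  · have hm : x ∈ PySem.List.dedup l := (PySem.List.mem_dedup _ _).mpr hx
    simp [PySem.Set.add, PySem.Set.contains, hx]
  · have hm : x ∉ PySem.List.dedup l := fun hc => hx ((PySem.List.mem_dedup _ _).mp hc)
    simp [PySem.Set.add, PySem.Set.contains, hx]

-- ---------- the group-by characterisation of the roles dict ----------

def pvGroup (E : List (String × (String × String))) : List (String × List (String × String)) :=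
  (PySem.List.dedup (E.map Prod.fst)).map
    (fun pid => (pid, (E.filter (fun e => e.1 = pid)).map Prod.snd))

theorem filter_nil_of_not_mem (E : List (String × (String × String))) (pid : String)
    (h : pid ∉ E.map Prod.fst) : E.filter (fun e => e.1 = pid) = [] := by
  rw [List.filter_eq_nil_iff]
  intro e he
  simp only [decide_eq_true_eq]
  intro hc
  exact h (List.mem_map.mpr ⟨e, he, hc⟩)

theorem pvGroup_snoc (E : List (String × (String × String))) (pid : String)
    (x : String × String) :
    pvGroup (E ++ [(pid, x)]) = pvAppRole (pvGroup E) pid x := by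
  unfold pvGroup pvAppRole
  have hfil : ∀ k, ((E ++ [(pid, x)]).filter (fun e => e.1 = k)).map Prod.snd
      = if pid = k then (E.filter (fun e => e.1 = k)).map Prod.snd ++ [x]
        else (E.filter (fun e => e.1 = k)).map Prod.snd := by
    intro k
    by_cases h : pid = k <;> simp [List.filter_append, h]
  have hkeys : (E ++ [(pid, x)]).map Prod.fst = E.map Prod.fst ++ [pid] := by simp
  rw [hkeys, dedup_snoc]
  by_cases hmem : pid ∈ E.map Prod.fst
  · rw [if_pos hmem]
    have hnd := PySem.List.nodup_dedup (E.map Prod.fst)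
    have hk : pid ∈ PySem.List.dedup (E.map Prod.fst) := (PySem.List.mem_dedup _ _).mpr hmem
    rw [pvUpd_map _ _ _ _ hnd hk]
    apply List.map_congr_left
    intro j _
    rw [hfil j]
    by_cases h : j = pid
    · simp [h]
    · have h' : ¬ pid = j := fun hc => h hc.symm
      simp [h, h']
  · rw [if_neg hmem]
    have hknot : pid ∉ ((PySem.List.dedup (E.map Prod.fst)).map
        (fun k => (k, (E.filter (fun e => e.1 = k)).map Prod.snd))).map Prod.fst := by
      simp only [List.map_map]
      intro hc
      rcases List.mem_map.mp hc with ⟨j, hj, hj2⟩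
      simp only [Function.comp] at hj2
      exact hmem ((PySem.List.mem_dedup _ _).mp (hj2 ▸ hj))
    rw [pvUpd_not_mem _ _ _ hknot, List.map_append]
    congr 1
    · apply List.map_congr_left
      intro j hj
      have hjm : j ∈ E.map Prod.fst := (PySem.List.mem_dedup _ _).mp hj
      have h : ¬ pid = j := fun hc => hmem (hc ▸ hjm)
      rw [hfil j, if_neg h]
    · simp [filter_nil_of_not_mem E pid hmem]

-- folding the roles updates over the event stream yields the group-by
theorem foldl_appRole_eq_pvGroup (E : List (String × (String × String)))
    (pr : List (String × List (String × String)))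
    (hpr : pr = pvGroup []) :
    E.foldl (fun pr e => pvAppRole pr e.1 e.2) pr = pvGroup E := by
  subst hpr
  induction E using List.reverseRecOn with
  | nil => rfl
  | append_singleton E e ih =>
    rw [List.foldl_append, List.foldl_cons, List.foldl_nil, ih]
    exact (pvGroup_snoc E e.1 e.2).symm

-- ---------- flattening: the nested folds equal one pass over the event stream ----------

def pvGA (a : String × List (String × List String)) : List (String × (String × String)) :=
  (pvGetList a.2 "normal_data").map (fun pid => (pid, (a.1, "normal")))
    ++ (pvGetList a.2 "outliers").map (fun pid => (pid, (a.1, "outlier")))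

theorem foldl_snoc_map {α β : Type} (l : List α) (h : α → β) (ev : List β) :
    l.foldl (fun ev x => ev ++ [h x]) ev = ev ++ l.map h := by
  induction l generalizing ev with
  | nil => simp
  | cons x t ih => simp [ih]

theorem pvEvents_eq (ad : List (String × List (String × List String))) :
    pvEvents ad = ad.flatMap pvGA := by
  suffices h : ∀ ev, ad.foldl
      (fun ev a =>
        let ev1 := (pvGetList a.2 "normal_data").foldl
          (fun ev pid => ev ++ [(pid, (a.1, "normal"))]) ev
        (pvGetList a.2 "outliers").foldl
          (fun ev pid => ev ++ [(pid, (a.1, "outlier"))]) ev1) ev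
      = ev ++ ad.flatMap pvGA by
    exact (h []).trans (by simp)
  induction ad with
  | nil => simp
  | cons a t ih =>
    intro ev
    rw [List.foldl_cons, ih]
    simp only [foldl_snoc_map, List.flatMap_cons, pvGA, List.append_assoc]

-- A's nested roles fold, rewritten as one fold over the event stream
theorem nested_roles_eq (ad : List (String × List (String × List String)))
    (pr : List (String × List (String × String))) :
    ad.foldl (fun pr a =>
        let pr1 := (pvGetList a.2 "normal_data").foldl
          (fun pr pid => pvAppRole pr pid (a.1, "normal")) pr
        (pvGetList a.2 "outliers").foldl
          (fun pr pid => pvAppRole pr pid (a.1, "outlier")) pr1) pr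
      = (ad.flatMap pvGA).foldl (fun pr e => pvAppRole pr e.1 e.2) pr := by
  induction ad generalizing pr with
  | nil => rfl
  | cons a t ih =>
    rw [List.foldl_cons, ih, List.flatMap_cons, List.foldl_append]
    simp [pvGA, List.foldl_append, List.foldl_map]

-- ---------- A: the combined loop, projected ----------

def pvStepRs (pa : List (String × List String)) (pid : String)
    (rs : List (String × String)) : List (String × List String) :=
  rs.foldl (fun pa r => pvAddAuthor pa pid r.1) pa

def pvFoldD (pa : List (String × List String)) (pr : List (String × List (String × String))) :
    List (String × List String) :=
  pr.foldl (fun pa e => pvStepRs pa e.1 e.2) pa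

theorem pvUpd_comm_of_mem {β : Type} (l : List (String × List β)) (j k : String)
    (g f : List β → List β) (hmem : j ∈ l.map Prod.fst) (hne : j ≠ k) :
    pvUpd (pvUpd l j g) k f = pvUpd (pvUpd l k f) j g := by
  induction l with
  | nil => simp at hmem
  | cons p t ih =>
    by_cases hj : p.1 = j
    · have hk : ¬ p.1 = k := by rw [hj]; exact hne
      simp [pvUpd, hj, hne]
    · by_cases hk : p.1 = k
      · have hj' : ¬ k = j := Ne.symm hne
        simp [pvUpd, hk, hj']
      · have hjt : j ∈ t.map Prod.fst := by
          rcases List.mem_cons.mp hmem with h | h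
          · exact absurd h.symm hj
          · exact h
        simp [pvUpd, hj, hk, ih hjt]

theorem mem_keys_pvStepRs (pa : List (String × List String)) (q j : String)
    (rs : List (String × String)) (h : j ∈ pa.map Prod.fst) :
    j ∈ (pvStepRs pa q rs).map Prod.fst := by
  induction rs generalizing pa with
  | nil => exact h
  | cons r rs ih =>
    exact ih _ (mem_keys_pvUpd _ _ _ _ h)

theorem pvStepRs_addAuthor_comm (pa : List (String × List String)) (pid q a : String)
    (rs : List (String × String)) (hmem : pid ∈ pa.map Prod.fst) (hne : pid ≠ q) :
    pvStepRs (pvAddAuthor pa pid a) q rs = pvAddAuthor (pvStepRs pa q rs) pid a := by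
  induction rs generalizing pa with
  | nil => rfl
  | cons r rs ih =>
    show pvStepRs (pvAddAuthor (pvAddAuthor pa pid a) q r.1) q rs
        = pvAddAuthor (pvStepRs (pvAddAuthor pa q r.1) q rs) pid a
    have hcomm : pvAddAuthor (pvAddAuthor pa pid a) q r.1
        = pvAddAuthor (pvAddAuthor pa q r.1) pid a :=
      pvUpd_comm_of_mem pa pid q _ _ hmem hne
    rw [hcomm]
    exact ih (pvAddAuthor pa q r.1) (mem_keys_pvUpd _ _ _ _ hmem)

theorem pvFoldD_addAuthor_comm (t : List (String × List (String × String)))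
    (pa : List (String × List String)) (pid a : String)
    (hmem : pid ∈ pa.map Prod.fst) (hnot : pid ∉ t.map Prod.fst) :
    pvFoldD (pvAddAuthor pa pid a) t = pvAddAuthor (pvFoldD pa t) pid a := by
  induction t generalizing pa with
  | nil => rfl
  | cons e t ih =>
    have hne : pid ≠ e.1 := by
      intro h
      exact hnot (by simp [h])
    have hnot' : pid ∉ t.map Prod.fst := fun h => hnot (List.mem_cons_of_mem _ h)
    show pvFoldD (pvStepRs (pvAddAuthor pa pid a) e.1 e.2) t
        = pvAddAuthor (pvFoldD (pvStepRs pa e.1 e.2) t) pid a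
    rw [pvStepRs_addAuthor_comm pa pid e.1 a e.2 hmem hne]
    exact ih _ (mem_keys_pvStepRs _ _ _ _ hmem) hnot'

theorem pvStepRs_append (pa : List (String × List String)) (pid : String)
    (rs : List (String × String)) (x : String × String) :
    pvStepRs pa pid (rs ++ [x]) = pvAddAuthor (pvStepRs pa pid rs) pid x.1 := by
  simp [pvStepRs, List.foldl_append]

theorem self_mem_keys_pvStepRs (pa : List (String × List String)) (pid : String)
    (r : String × String) (rs : List (String × String)) :
    pid ∈ (pvStepRs pa pid (r :: rs)).map Prod.fst := by
  show pid ∈ (pvStepRs (pvAddAuthor pa pid r.1) pid rs).map Prod.fst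
  exact mem_keys_pvStepRs _ _ _ _ (self_mem_keys_pvUpd _ _ _)

theorem pvFoldD_appRole (pr : List (String × List (String × String)))
    (pa : List (String × List String)) (pid : String) (x : String × String)
    (hnd : (pr.map Prod.fst).Nodup) (hne : ∀ e ∈ pr, e.2 ≠ []) :
    pvFoldD pa (pvAppRole pr pid x) = pvAddAuthor (pvFoldD pa pr) pid x.1 := by
  induction pr generalizing pa with
  | nil => rfl
  | cons e t ih =>
    rw [List.map_cons] at hnd
    obtain ⟨h1, h2⟩ := List.nodup_cons.mp hnd
    by_cases h : e.1 = pid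
    · have hnot : pid ∉ t.map Prod.fst := by rwa [h] at h1
      show pvFoldD pa (pvUpd (e :: t) pid (fun rs => rs ++ [x]))
          = pvAddAuthor (pvFoldD (pvStepRs pa e.1 e.2) t) pid x.1
      rw [pvUpd, if_pos h]
      show pvFoldD (pvStepRs pa e.1 (e.2 ++ [x])) t = _
      rw [pvStepRs_append, h]
      have hmem : pid ∈ (pvStepRs pa pid e.2).map Prod.fst := by
        obtain ⟨r, rs, hrs⟩ := List.exists_cons_of_ne_nil (hne e (List.mem_cons_self))
        rw [hrs]
        exact self_mem_keys_pvStepRs pa pid r rs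
      exact pvFoldD_addAuthor_comm t _ pid x.1 hmem hnot
    · show pvFoldD pa (pvUpd (e :: t) pid (fun rs => rs ++ [x]))
          = pvAddAuthor (pvFoldD (pvStepRs pa e.1 e.2) t) pid x.1
      rw [pvUpd, if_neg h]
      exact ih _ h2 (fun e' he' => hne e' (List.mem_cons_of_mem _ he'))

theorem nodup_keys_pvAppRole (pr : List (String × List (String × String)))
    (pid : String) (x : String × String) (hnd : (pr.map Prod.fst).Nodup) :
    ((pvAppRole pr pid x).map Prod.fst).Nodup := by
  unfold pvAppRole
  rw [keys_pvUpd]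
  split_ifs with hk
  · exact hnd
  · simp only [List.nodup_append, List.nodup_cons, List.not_mem_nil, not_false_iff,
      List.nodup_nil, and_true, true_and]
    refine ⟨hnd, ?_⟩
    intro a ha b hb
    rcases List.mem_singleton.mp hb with rfl
    intro hab
    exact hk (hab ▸ ha)

theorem ne_nil_pvAppRole (pr : List (String × List (String × String)))
    (pid : String) (x : String × String) (hne : ∀ e ∈ pr, e.2 ≠ []) :
    ∀ e ∈ pvAppRole pr pid x, e.2 ≠ [] := by
  unfold pvAppRole
  induction pr with
  | nil =>
    intro e he
    rcases List.mem_singleton.mp he with rfl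
    simp
  | cons p t ih =>
    intro e he
    by_cases h : p.1 = pid
    · have hu : pvUpd (p :: t) pid (fun rs => rs ++ [x]) = (p.1, p.2 ++ [x]) :: t := by
        simp [pvUpd, h]
      rw [hu] at he
      rcases List.mem_cons.mp he with h' | h'
      · subst h'; simp
      · exact hne e (List.mem_cons_of_mem _ h')
    · have hu : pvUpd (p :: t) pid (fun rs => rs ++ [x])
          = p :: pvUpd t pid (fun rs => rs ++ [x]) := by
        simp [pvUpd, h]
      rw [hu] at he
      rcases List.mem_cons.mp he with h' | h'
      · exact h' ▸ hne p List.mem_cons_self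
      · exact ih (fun e' he' => hne e' (List.mem_cons_of_mem _ he')) e h'

-- the invariant carried through A's combined loop
def pvInv (st : (List (String × List String)) × (List (String × List (String × String)))) :
    Prop :=
  (st.2.map Prod.fst).Nodup ∧ (∀ e ∈ st.2, e.2 ≠ []) ∧ st.1 = pvFoldD [] st.2

theorem pvInv_stepA (aid role : String)
    (st : (List (String × List String)) × (List (String × List (String × String))))
    (pid : String) (h : pvInv st) : pvInv (pvStepA aid role st pid) := by
  obtain ⟨hnd, hnil, heq⟩ := h
  refine ⟨nodup_keys_pvAppRole _ _ _ hnd, ne_nil_pvAppRole _ _ _ hnil, ?_⟩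
  show pvAddAuthor st.1 pid aid = pvFoldD [] (pvAppRole st.2 pid (aid, role))
  rw [pvFoldD_appRole st.2 [] pid (aid, role) hnd hnil, heq]

theorem pvInv_foldA (aid role : String) (pids : List String)
    (st : (List (String × List String)) × (List (String × List (String × String))))
    (h : pvInv st) : pvInv (pids.foldl (pvStepA aid role) st) := by
  induction pids generalizing st with
  | nil => exact h
  | cons pid pids ih => exact ih _ (pvInv_stepA aid role st pid h)

theorem snd_foldA (aid role : String) (pids : List String)
    (st : (List (String × List String)) × (List (String × List (String × String)))) :
    (pids.foldl (pvStepA aid role) st).2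
      = pids.foldl (fun pr pid => pvAppRole pr pid (aid, role)) st.2 := by
  induction pids generalizing st with
  | nil => rfl
  | cons pid pids ih => exact ih (pvStepA aid role st pid)

def pvOuterStep (st : (List (String × List String)) × (List (String × List (String × String))))
    (a : String × List (String × List String)) :
    (List (String × List String)) × (List (String × List (String × String))) :=
  let st1 := (pvGetList a.2 "normal_data").foldl (pvStepA a.1 "normal") st
  (pvGetList a.2 "outliers").foldl (pvStepA a.1 "outlier") st1

theorem pvInv_outer (ad : List (String × List (String × List String)))
    (st : (List (String × List String)) × (List (String × List (String × String))))
    (h : pvInv st) : pvInv (ad.foldl pvOuterStep st) := by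
  induction ad generalizing st with
  | nil => exact h
  | cons a t ih =>
    exact ih _ (pvInv_foldA _ _ _ _ (pvInv_foldA _ _ _ _ h))

theorem snd_outer (ad : List (String × List (String × List String)))
    (st : (List (String × List String)) × (List (String × List (String × String)))) :
    (ad.foldl pvOuterStep st).2
      = ad.foldl (fun pr a =>
          let pr1 := (pvGetList a.2 "normal_data").foldl
            (fun pr pid => pvAppRole pr pid (a.1, "normal")) pr
          (pvGetList a.2 "outliers").foldl
            (fun pr pid => pvAppRole pr pid (a.1, "outlier")) pr1) st.2 := by
  induction ad generalizing st with
  | nil => rfl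
  | cons a t ih =>
    show (t.foldl pvOuterStep (pvOuterStep st a)).2 = _
    rw [ih (pvOuterStep st a)]
    show _ = t.foldl _ ((pvGetList a.2 "outliers").foldl _
        ((pvGetList a.2 "normal_data").foldl (fun pr pid => pvAppRole pr pid (a.1, "normal")) st.2))
    congr 1
    show ((pvGetList a.2 "outliers").foldl (pvStepA a.1 "outlier")
        ((pvGetList a.2 "normal_data").foldl (pvStepA a.1 "normal") st)).2 = _
    rw [snd_foldA, snd_foldA]

theorem buildA_eq_outer (ad : List (String × List (String × List String))) :
    build_global_paper_to_authors ad = ad.foldl pvOuterStep ([], []) := rfl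

theorem snd_buildA (ad : List (String × List (String × List String))) :
    (build_global_paper_to_authors ad).2 = pvGroup (pvEvents ad) := by
  rw [buildA_eq_outer, snd_outer, nested_roles_eq, ← pvEvents_eq]
  exact foldl_appRole_eq_pvGroup _ _ rfl

theorem fst_buildA (ad : List (String × List (String × List String))) :
    (build_global_paper_to_authors ad).1
      = pvFoldD [] (build_global_paper_to_authors ad).2 := by
  have h : pvInv (ad.foldl pvOuterStep ([], [])) :=
    pvInv_outer ad ([], []) ⟨List.nodup_nil, by simp, rfl⟩
  rw [buildA_eq_outer]
  exact h.2.2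

-- ---------- pvFoldD over a grouped (nodup keys, nonempty values) dict ----------

theorem pvUpd_append_last {β : Type} (pa : List (String × List β)) (k : String)
    (s : List β) (f : List β → List β) (h : k ∉ pa.map Prod.fst) :
    pvUpd (pa ++ [(k, s)]) k f = pa ++ [(k, f s)] := by
  induction pa with
  | nil => simp [pvUpd]
  | cons p t ih =>
    have h1 : ¬ p.1 = k := by intro hc; exact h (by simp [hc])
    have h2 : k ∉ t.map Prod.fst := fun hm => h (by simp [hm])
    simp [pvUpd, h1, ih h2]

theorem pvStepRs_last (pa : List (String × List String)) (k : String)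
    (s : List String) (rs : List (String × String)) (h : k ∉ pa.map Prod.fst) :
    pvStepRs (pa ++ [(k, s)]) k rs
      = pa ++ [(k, rs.foldl (fun s r => PySem.Set.add s r.1) s)] := by
  induction rs generalizing s with
  | nil => rfl
  | cons r rs ih =>
    show pvStepRs (pvAddAuthor (pa ++ [(k, s)]) k r.1) k rs = _
    rw [show pvAddAuthor (pa ++ [(k, s)]) k r.1 = pa ++ [(k, PySem.Set.add s r.1)] from
      pvUpd_append_last pa k s _ h]
    exact ih (PySem.Set.add s r.1)

theorem pvStepRs_fresh (pa : List (String × List String)) (k : String)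
    (rs : List (String × String)) (h : k ∉ pa.map Prod.fst) (hne : rs ≠ []) :
    pvStepRs pa k rs = pa ++ [(k, rs.foldl (fun s r => PySem.Set.add s r.1) [])] := by
  obtain ⟨r, rs', hrs⟩ := List.exists_cons_of_ne_nil hne
  subst hrs
  show pvStepRs (pvAddAuthor pa k r.1) k rs' = _
  rw [show pvAddAuthor pa k r.1 = pa ++ [(k, PySem.Set.add [] r.1)] from
    pvUpd_not_mem pa k _ h]
  rw [pvStepRs_last pa k _ rs' h]
  rfl

theorem pvFoldD_grouped (l : List (String × List (String × String)))
    (pa : List (String × List String))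
    (hnd : (l.map Prod.fst).Nodup) (hne : ∀ e ∈ l, e.2 ≠ [])
    (hdisj : ∀ k ∈ l.map Prod.fst, k ∉ pa.map Prod.fst) :
    pvFoldD pa l
      = pa ++ l.map (fun e => (e.1, e.2.foldl (fun s r => PySem.Set.add s r.1) [])) := by
  induction l generalizing pa with
  | nil => simp [pvFoldD]
  | cons e t ih =>
    rw [List.map_cons] at hnd
    obtain ⟨h1, h2⟩ := List.nodup_cons.mp hnd
    have hke : e.1 ∉ pa.map Prod.fst := hdisj e.1 (by simp)
    show pvFoldD (pvStepRs pa e.1 e.2) t = _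
    rw [pvStepRs_fresh pa e.1 e.2 hke (hne e List.mem_cons_self)]
    rw [ih (pa ++ [(e.1, e.2.foldl (fun s r => PySem.Set.add s r.1) [])]) h2
      (fun e' he' => hne e' (List.mem_cons_of_mem _ he'))
      (by
        intro k hk
        simp only [List.map_append, List.mem_append, List.map_cons, List.map_nil,
          List.mem_singleton, not_or]
        constructor
        · exact hdisj k (by simp [hk])
        · intro hc
          exact h1 (hc ▸ hk))]
    simp

-- ---------- assembling the verdict ----------

theorem alt_snd (ad : List (String × List (String × List String))) :
    (build_global_paper_to_authors_alt ad).2 = pvGroup (pvEvents ad) := rfl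

theorem keys_pvGroup (E : List (String × (String × String))) :
    (pvGroup E).map Prod.fst = PySem.List.dedup (E.map Prod.fst) := by
  simp [pvGroup, List.map_map, Function.comp_def]

theorem values_pvGroup_ne_nil (E : List (String × (String × String))) :
    ∀ e ∈ pvGroup E, e.2 ≠ [] := by
  intro e he
  rcases List.mem_map.mp he with ⟨pid, hpid, rfl⟩
  have hmem : pid ∈ E.map Prod.fst := (PySem.List.mem_dedup _ _).mp hpid
  rcases List.mem_map.mp hmem with ⟨x, hx, rfl⟩
  intro hc
  have : x ∈ E.filter (fun e => e.1 = x.1) := List.mem_filter.mpr ⟨hx, by simp⟩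
  rw [List.map_eq_nil_iff.mp hc] at this
  simp at this

theorem alt_fst (ad : List (String × List (String × List String))) :
    (build_global_paper_to_authors_alt ad).1
      = (pvGroup (pvEvents ad)).map
          (fun e => (e.1, e.2.foldl (fun s r => PySem.Set.add s r.1) [])) := by
  show (PySem.List.dedup ((pvEvents ad).map (fun e => e.1))).map _ = _
  rw [pvGroup, List.map_map]
  apply List.map_congr_left
  intro pid _
  simp only [Function.comp]
  congr 1
  rw [PySem.Set.ofList_eq_foldl, List.foldl_map, List.foldl_map]

-- ===== VERDICT (by name: the statement is the Claim_ definition above) =====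
theorem build_global_paper_to_authors_spec : Claim_equal_build_global_paper_to_authors := by
  intro ad _
  show build_global_paper_to_authors ad = build_global_paper_to_authors_alt ad
  have h2 : (build_global_paper_to_authors ad).2 = (build_global_paper_to_authors_alt ad).2 := by
    rw [snd_buildA, alt_snd]
  have h1 : (build_global_paper_to_authors ad).1 = (build_global_paper_to_authors_alt ad).1 := by
    rw [fst_buildA, snd_buildA, alt_fst]
    rw [pvFoldD_grouped _ [] (by rw [keys_pvGroup]; exact PySem.List.nodup_dedup _)
      (values_pvGroup_ne_nil _) (by simp)]
    simp
  exact Prod.ext h1 h2
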